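-- pv_equiv track=rewrite | github.com/jpmoo/banshee | map_generator.py | _has_resource_within_range_optimized
-- ===== SOURCE A (Python) =====
-- from typing import List, Tuple, Set, Dict, Optional
--
-- def _has_resource_within_range_optimized(x: int, y: int, resource_tiles: Set[Tuple[int, int]],
--                                          max_range: int) -> bool:
--     """
--     Optimized version that only checks nearby tiles instead of all resource tiles.
--     Much faster for small ranges.
--
--     Args:
--         x, y: Starting coordinates
--         resource_tiles: Set of resource tile coordinates
--         max_range: Maximum distance to search
--
--     Returns:
--         True if resource found within range
--     """
--     # Only check tiles within the range box (much faster for small ranges)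
--     for dy in range(-max_range, max_range + 1):
--         for dx in range(-max_range, max_range + 1):
--             # Check Manhattan distance
--             if abs(dx) + abs(dy) > max_range:
--                 continue
--             nx, ny = x + dx, y + dy
--             if (nx, ny) in resource_tiles:
--                 return True
--     return False
-- ===== SOURCE B (Python) =====
-- def _has_resource_within_range_optimized(x: int, y: int, resource_tiles, max_range: int) -> bool:
--     return any(abs(rx - x) + abs(ry - y) <= max_range for (rx, ry) in resource_tiles)
-- ===== Notes on version B (the rewrite author's own statement) =====
-- stated objective: faster
-- what changed: B scans the resource collection once testing each tile's Manhattan distance, instead of enumerating every (dx,dy) offset in the (2*max_range+1)^2 box and probing set membership.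
import Mathlib
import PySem

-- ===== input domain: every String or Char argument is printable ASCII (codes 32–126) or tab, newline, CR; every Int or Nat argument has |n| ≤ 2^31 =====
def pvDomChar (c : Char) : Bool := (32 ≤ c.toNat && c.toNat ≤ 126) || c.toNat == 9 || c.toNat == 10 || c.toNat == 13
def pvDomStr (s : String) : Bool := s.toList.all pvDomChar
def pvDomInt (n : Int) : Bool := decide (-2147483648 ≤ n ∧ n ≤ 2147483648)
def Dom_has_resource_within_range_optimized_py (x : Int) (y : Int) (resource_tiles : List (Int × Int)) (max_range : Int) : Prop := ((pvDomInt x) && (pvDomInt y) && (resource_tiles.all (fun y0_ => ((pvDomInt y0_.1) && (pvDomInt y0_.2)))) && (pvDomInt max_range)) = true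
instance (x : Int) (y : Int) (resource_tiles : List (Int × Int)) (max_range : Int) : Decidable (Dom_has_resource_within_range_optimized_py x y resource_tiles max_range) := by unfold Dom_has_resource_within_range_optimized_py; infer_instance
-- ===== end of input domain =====

-- B scans the resource list once, testing each tile's Manhattan distance, instead of
-- enumerating every (dx,dy) offset in the diamond and probing membership (alternative traversal).

-- ===== PORT A =====
-- nested 'for dy … for dx …' with early 'return True' ≡ any over the two ranges
def has_resource_within_range_optimized_py (x : Int) (y : Int) (resource_tiles : List (Int × Int)) (max_range : Int) : Bool :=
  (PySem.List.pyRange (-max_range) (max_range + 1) 1).any (fun dy =>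
    (PySem.List.pyRange (-max_range) (max_range + 1) 1).any (fun dx =>
      if |dx| + |dy| > max_range then false
      else resource_tiles.contains (x + dx, y + dy)))

-- ===== PORT B =====
def has_resource_within_range_optimized_py_alt (x : Int) (y : Int) (resource_tiles : List (Int × Int)) (max_range : Int) : Bool :=
  resource_tiles.any (fun r => decide (|r.1 - x| + |r.2 - y| ≤ max_range))

-- ===== PRECONDITION & SPEC =====
def Spec_has_resource_within_range_optimized_py (x : Int) (y : Int) (resource_tiles : List (Int × Int)) (max_range : Int) (out : Bool) : Prop := out = has_resource_within_range_optimized_py_alt x y resource_tiles max_range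
instance (x : Int) (y : Int) (resource_tiles : List (Int × Int)) (max_range : Int) (out : Bool) : Decidable (Spec_has_resource_within_range_optimized_py x y resource_tiles max_range out) := by unfold Spec_has_resource_within_range_optimized_py; infer_instance

-- ===== CLAIM (what is proved, stated in full; the proofs are below) =====
def Claim_equal_has_resource_within_range_optimized_py : Prop := ∀ (x : Int) (y : Int) (resource_tiles : List (Int × Int)) (max_range : Int), Dom_has_resource_within_range_optimized_py x y resource_tiles max_range → Spec_has_resource_within_range_optimized_py x y resource_tiles max_range (has_resource_within_range_optimized_py x y resource_tiles max_range)

-- ===== LEMMAS AND PROOFS =====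

theorem hr_eq (x : Int) (y : Int) (resource_tiles : List (Int × Int)) (max_range : Int) :
    has_resource_within_range_optimized_py x y resource_tiles max_range
      = has_resource_within_range_optimized_py_alt x y resource_tiles max_range := by
  unfold has_resource_within_range_optimized_py has_resource_within_range_optimized_py_alt
  rw [Bool.eq_iff_iff]
  simp only [List.any_eq_true, PySem.List.mem_pyRange_one, decide_eq_true_eq]
  constructor
  · rintro ⟨dy, ⟨hdy1, hdy2⟩, dx, ⟨hdx1, hdx2⟩, h⟩
    split_ifs at h with hgt
    rw [List.contains_iff_mem] at h
    refine ⟨(x + dx, y + dy), h, ?_⟩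
    simp only [add_sub_cancel_left]
    omega
  · rintro ⟨⟨rx, ry⟩, hmem, hdist⟩
    dsimp only at hdist
    have hax : |rx - x| ≤ max_range := by
      have := abs_nonneg (ry - y); omega
    have hay : |ry - y| ≤ max_range := by
      have := abs_nonneg (rx - x); omega
    have hax' := abs_le.mp hax
    have hay' := abs_le.mp hay
    refine ⟨ry - y, ⟨by omega, by omega⟩, rx - x, ⟨by omega, by omega⟩, ?_⟩
    rw [if_neg (by omega)]
    have hx : x + (rx - x) = rx := by ring
    have hy : y + (ry - y) = ry := by ring
    rw [hx, hy, List.contains_iff_mem]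
    exact hmem

-- ===== VERDICT (by name: the statement is the Claim_ definition above) =====
theorem has_resource_within_range_optimized_py_spec : Claim_equal_has_resource_within_range_optimized_py := by
  intro x y ts m _
  exact hr_eq x y ts m
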